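-- pv_equiv track=rewrite | github.com/furkanunsal42/ComputerProject0 | JackCompiler.py | is_string_constant
-- ===== SOURCE A (Python) =====
-- def is_string_constant(token):
--     if len(token) < 2:
--         return False
--     if token[0] != "\"" or token[-1] != "\"":
--         return False
--     banned_characters = "\n\""
--     for c in token[1:-1]:
--         if c in banned_characters:
--             return False
--     return True
-- ===== SOURCE B (Python) =====
-- def is_string_constant(token):
--     it = iter(token)
--     if next(it, None) != '"':
--         return False
--     for c in it:
--         if c == '"':
--             return next(it, None) is None  # closing quote must end the token
--         if c == '\n':
--             return False
--     return False
-- ===== Notes on version B (the rewrite author's own statement) =====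
-- stated objective: alternative
-- what changed: B replaces A's length guard, two end-index checks and interior scan over a slice with a single forward pass of a tiny state machine (consume opening quote, scan until the closing quote, accept only if nothing follows), building no slice.
import Mathlib
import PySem

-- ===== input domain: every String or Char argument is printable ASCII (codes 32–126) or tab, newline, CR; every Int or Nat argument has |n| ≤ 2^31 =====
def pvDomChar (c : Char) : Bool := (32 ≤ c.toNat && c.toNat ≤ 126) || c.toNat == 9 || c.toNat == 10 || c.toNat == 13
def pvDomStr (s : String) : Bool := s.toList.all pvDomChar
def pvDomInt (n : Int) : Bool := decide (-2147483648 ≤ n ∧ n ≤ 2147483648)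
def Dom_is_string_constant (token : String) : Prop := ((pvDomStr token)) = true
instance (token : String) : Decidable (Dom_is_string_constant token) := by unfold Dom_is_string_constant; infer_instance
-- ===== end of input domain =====

-- B is a single-pass state machine (no slicing, no end-index checks); same O(n) cost, plainer scan.

-- ===== PORT A =====
-- the 'for c in token[1:-1]: if c in banned_characters: return False' loop
def aLoop : List Char → Bool
  | [] => true
  | c :: rest => if ("\n\"".toList).contains c then false else aLoop rest

def is_string_constant (token : String) : Bool :=
  if PySem.Str.len token < 2 then false
  else if !(PySem.Str.pyGet? token 0 == some '"') || !(PySem.Str.pyGet? token (-1) == some '"') then false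
  else aLoop (PySem.Str.slice token (some 1) (some (-1))).toList

-- ===== PORT B =====
-- Source B's 'for c in it' loop after the opening quote was consumed
def matchTail : List Char → Bool
  | [] => false
  | c :: rest =>
    if c = '"' then rest.isEmpty
    else if c = '\n' then false
    else matchTail rest

def is_string_constant_alt (token : String) : Bool :=
  match token.toList with
  | c :: rest => if c = '"' then matchTail rest else false
  | [] => false

-- ===== PRECONDITION & SPEC =====
def Spec_is_string_constant (token : String) (out : Bool) : Prop := out = is_string_constant_alt token
instance (token : String) (out : Bool) : Decidable (Spec_is_string_constant token out) := by unfold Spec_is_string_constant; infer_instance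

-- ===== CLAIM (what is proved, stated in full; the proofs are below) =====
def Claim_equal_is_string_constant : Prop := ∀ (token : String), Dom_is_string_constant token → Spec_is_string_constant token (is_string_constant token)

-- ===== LEMMAS AND PROOFS =====

-- B's scan after the opening quote = "last char is a quote and the interior is clean" (A's shape)
theorem matchTail_eq (rest : List Char) :
    matchTail rest = ((rest.getLast? == some '"') && aLoop rest.dropLast) := by
  induction rest with
  | nil => rfl
  | cons c rest ih =>
    cases rest with
    | nil =>
      by_cases h : c = '"'
      · simp [matchTail, aLoop, h]
      · by_cases h2 : c = '\n' <;> simp [matchTail, aLoop, h, h2]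
    | cons d rest' =>
      rw [matchTail]
      by_cases h : c = '"'
      · simp [aLoop, h]
      · by_cases h2 : c = '\n' <;> simp [aLoop, h, h2, ih]

theorem slice_one_neg_one (c : Char) (xs : List Char) :
    PySem.List.slice (c :: xs) (some 1) (some (-1)) = xs.dropLast := by
  have hz : ¬ ((xs.length : Int) < 0) := by omega
  simp [PySem.List.slice, PySem.List.clampIdx, hz, List.dropLast_eq_take]

-- ===== VERDICT (by name: the statement is the Claim_ definition above) =====
theorem is_string_constant_spec : Claim_equal_is_string_constant := by
  intro token _
  unfold Spec_is_string_constant is_string_constant is_string_constant_alt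
  rcases hl : token.toList with _ | ⟨c, _ | ⟨d, rest⟩⟩
  · simp [pysem, hl]
  · simp [pysem, hl, matchTail]
  · simp [pysem, hl, matchTail_eq, slice_one_neg_one]
    have hz : ¬ ((rest.length : Int) < 0) := by omega
    by_cases h : c = '"'
    · simp [h, hz, List.getLast?_eq_some_getLast, List.getLast_eq_getElem]
      generalize (d :: rest)[rest.length] = x
      by_cases hq : x = '"' <;> simp [hq]
    · simp [h, hz]
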